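-- pv_equiv track=rewrite | github.com/blank54/navi | test/activity_order_constraint.py | normallize_duplicated_activity
-- ===== SOURCE A (Python) =====
-- from collections import defaultdict
--
-- def normallize_duplicated_activity(schedule):
--     normalized_schedule = defaultdict(dict)
--
--     for location in schedule:
--         normalized_schedule[location] = {}
--
--         day = 0
--         for activity_code in schedule[location].values():
--             if activity_code not in normalized_schedule[location].values():
--                 normalized_schedule[location][day] = activity_code
--                 day += 1
--             else:
--                 continue
--
--     return normalized_schedule
-- ===== SOURCE B (Python) =====
-- from collections import defaultdict
--
-- def normallize_duplicated_activity(schedule):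
--     # Sieve-style: repeatedly take the first remaining code and filter all its
--     # later duplicates out of the rest; no seen-set, no membership test against
--     # the output being built, no manual day counter.
--     normalized_schedule = defaultdict(dict)
--     for location in schedule:
--         remaining = list(schedule[location].values())
--         uniq = []
--         while remaining:
--             head = remaining[0]
--             uniq.append(head)
--             remaining = [c for c in remaining[1:] if c != head]
--         normalized_schedule[location] = dict(enumerate(uniq))
--     return normalized_schedule
-- ===== Notes on version B (the rewrite author's own statement) =====
-- stated objective: alternative
-- what changed: A builds each location's dict in one interleaved pass with a manual day counter and a membership test against the partially built output; B uses a sieve: repeatedly take the first remaining code and filter all its later duplicates out of the rest of the input, then reindex the surviving sequence by enumeration.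
import Mathlib
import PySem

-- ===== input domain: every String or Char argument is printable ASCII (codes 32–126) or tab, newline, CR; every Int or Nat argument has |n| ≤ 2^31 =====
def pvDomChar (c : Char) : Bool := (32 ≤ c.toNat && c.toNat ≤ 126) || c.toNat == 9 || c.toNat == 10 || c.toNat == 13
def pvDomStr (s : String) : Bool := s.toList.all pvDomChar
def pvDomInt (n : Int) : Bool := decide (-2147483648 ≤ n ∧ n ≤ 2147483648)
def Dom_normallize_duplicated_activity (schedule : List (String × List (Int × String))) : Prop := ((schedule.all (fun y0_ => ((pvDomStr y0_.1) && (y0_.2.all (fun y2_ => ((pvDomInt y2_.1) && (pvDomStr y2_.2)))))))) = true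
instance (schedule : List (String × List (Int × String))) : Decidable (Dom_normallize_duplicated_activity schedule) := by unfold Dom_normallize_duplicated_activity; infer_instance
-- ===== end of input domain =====

-- B replaces A's interleaved seen-check/day-counter loop by a sieve (repeatedly take the
-- head and filter its later duplicates out of the remaining input, then enumerate);
-- objective: alternative. Equivalence is about the returned mapping (neither mutates input).

-- ===== PORT A =====
-- the inner 'for activity_code in schedule[location].values()' loop of A:
-- state = (normalized_schedule[location] as a dict, day)
def pvInnerA (vals : List String) : List (Int × String) :=
  (vals.foldl
    (fun (st : PySem.Dict Int String × Int) code =>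
      if (st.1.values).contains code = false then (st.1.insert st.2 code, st.2 + 1)
      else st)
    (⟨[]⟩, 0)).1.items

def normallize_duplicated_activity (schedule : List (String × List (Int × String))) : List (String × List (Int × String)) :=
  (schedule.foldl
    (fun (nd : PySem.Dict String (List (Int × String))) entry =>
      nd.insert entry.1
        (pvInnerA ((PySem.Dict.getD ⟨schedule⟩ entry.1 []).map Prod.snd)))
    ⟨[]⟩).items

-- ===== PORT B =====
-- Source B's while loop: take the head, filter its duplicates out of the rest, recurse
def pvSieve (vals : List String) : List String :=
  match vals with
  | [] => []
  | head :: rest => head :: pvSieve (rest.filter (fun c => c != head))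
termination_by vals.length
decreasing_by
  simp only [List.length_unattach, List.length_cons]
  exact Nat.lt_succ_of_le (le_trans (List.length_filter_le _ _) (by simp))

def normallize_duplicated_activity_alt (schedule : List (String × List (Int × String))) : List (String × List (Int × String)) :=
  schedule.map (fun entry =>
    (entry.1, PySem.List.enumerate (pvSieve (entry.2.map Prod.snd)) 0))

-- ===== PRECONDITION & SPEC =====
-- schedule is a Python dict, so duplicate location keys cannot occur; an assoc list with
-- duplicate keys represents no dict input of A, hence is excluded.
def Pre_normallize_duplicated_activity (schedule : List (String × List (Int × String))) : Prop :=
  (schedule.map Prod.fst).Nodup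
instance (schedule : List (String × List (Int × String))) : Decidable (Pre_normallize_duplicated_activity schedule) := by unfold Pre_normallize_duplicated_activity; infer_instance

def pvWitness_normallize_duplicated_activity : (List (String × List (Int × String))) :=
  [("siteA", [(0, "x"), (1, "y"), (2, "x"), (4, "y")]), ("siteB", [])]

def Spec_normallize_duplicated_activity (schedule : List (String × List (Int × String))) (out : List (String × List (Int × String))) : Prop := out = normallize_duplicated_activity_alt schedule
instance (schedule : List (String × List (Int × String))) (out : List (String × List (Int × String))) : Decidable (Spec_normallize_duplicated_activity schedule out) := by unfold Spec_normallize_duplicated_activity; infer_instance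

-- ===== CLAIM (what is proved, stated in full; the proofs are below) =====
def Claim_equal_normallize_duplicated_activity : Prop := ∀ (schedule : List (String × List (Int × String))), Dom_normallize_duplicated_activity schedule → Pre_normallize_duplicated_activity schedule → Spec_normallize_duplicated_activity schedule (normallize_duplicated_activity schedule)

-- ===== LEMMAS AND PROOFS =====

theorem pvSieve_nil : pvSieve [] = [] := by simp [pvSieve]

theorem pvSieve_cons (h : String) (t : List String) :
    pvSieve (h :: t) = h :: pvSieve (t.filter (fun c => c != h)) := by simp [pvSieve]

-- keys of (enumerate u s) are all < s + u.length
theorem pv_enumerate_no_key {α : Type} (u : List α) (s k : Int) (h : s + u.length ≤ k) :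
    (PySem.List.enumerate u s).any (fun p => p.1 == k) = false := by
  induction u generalizing s with
  | nil => simp [PySem.List.enumerate]
  | cons x t ih =>
      rw [PySem.List.enumerate_cons]
      simp only [List.any_cons, Bool.or_eq_false_iff]
      constructor
      · simp only [List.length_cons] at h
        have : s ≠ k := by push_cast at h; omega
        simpa using this
      · exact ih (s + 1) (by simp at h ⊢; omega)

-- the inner-loop invariant: starting from an already-built deduped prefix u,
-- A's loop extends it exactly as folding PySem.Set.add does
theorem pvInnerA_invariant (vals u : List String) :
    (vals.foldl
      (fun (st : PySem.Dict Int String × Int) code =>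
        if (st.1.values).contains code = false then (st.1.insert st.2 code, st.2 + 1)
        else st)
      (⟨PySem.List.enumerate u 0⟩, (u.length : Int))).1.items
    = PySem.List.enumerate (List.foldl PySem.Set.add u vals) 0 := by
  induction vals generalizing u with
  | nil => simp
  | cons code t ih =>
      simp only [List.foldl_cons]
      have hvals : (PySem.Dict.values (⟨PySem.List.enumerate u 0⟩ : PySem.Dict Int String)) = u := by
        simp [PySem.Dict.values, PySem.List.map_snd_enumerate]
      by_cases hm : code ∈ u
      · have : (PySem.Dict.values (⟨PySem.List.enumerate u 0⟩ : PySem.Dict Int String)).contains code = true := by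
          rw [hvals]; simpa using hm
        rw [this]
        simp only [Bool.true_eq_false, if_false]
        rw [PySem.Set.add_of_mem hm]
        exact ih u
      · have : (PySem.Dict.values (⟨PySem.List.enumerate u 0⟩ : PySem.Dict Int String)).contains code = false := by
          rw [hvals]; simpa using hm
        rw [this]
        simp only [if_true]
        have hins : PySem.Dict.insert (⟨PySem.List.enumerate u 0⟩ : PySem.Dict Int String) (u.length : Int) code
            = ⟨PySem.List.enumerate u 0 ++ [((u.length : Int), code)]⟩ := by
          have hc : (⟨PySem.List.enumerate u 0⟩ : PySem.Dict Int String).contains (u.length : Int) = false := by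
            simp only [PySem.Dict.contains]
            exact pv_enumerate_no_key u 0 (u.length : Int) (by omega)
          simp [PySem.Dict.insert, hc]
        rw [PySem.Set.add_of_not_mem hm, hins]
        have henum : PySem.List.enumerate (u ++ [code]) 0
            = PySem.List.enumerate u 0 ++ [((u.length : Int), code)] := by
          rw [PySem.List.enumerate_append]
          simp [PySem.List.enumerate]
        have hlen : ((u ++ [code]).length : Int) = (u.length : Int) + 1 := by
          simp
        rw [← henum, ← hlen]
        exact ih (u ++ [code])

-- the sieve computes the same sequence as folding Set.add over a seen-prefix u
theorem pvSieve_foldl (vals : List String) : ∀ (u : List String),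
    List.foldl PySem.Set.add u vals = u ++ pvSieve (vals.filter (fun v => !u.contains v)) := by
  induction vals with
  | nil => intro u; simp [pvSieve_nil]
  | cons c t ih =>
      intro u
      by_cases hm : c ∈ u
      · have hc : (!u.contains c) = false := by simpa using hm
        rw [List.filter_cons, hc]
        simp only [List.foldl_cons, PySem.Set.add_of_mem hm]
        exact ih u
      · have hc : (!u.contains c) = true := by simpa using hm
        rw [List.filter_cons, hc]
        simp only [if_true, List.foldl_cons, PySem.Set.add_of_not_mem hm]
        rw [ih (u ++ [c])]
        have hfe : (t.filter (fun v => !u.contains v)).filter (fun v => v != c)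
            = t.filter (fun v => !(u ++ [c]).contains v) := by
          rw [List.filter_filter]
          apply List.filter_congr
          intro x _
          simp only [List.contains_append, Bool.not_or, List.contains_cons]
          cases hxc : x == c <;> cases hxu : u.contains x <;>
            simp [bne, hxc]
        rw [pvSieve_cons, hfe]
        simp
theorem pvSieve_eq_foldl_add (vals : List String) :
    List.foldl PySem.Set.add [] vals = pvSieve vals := by
  have := pvSieve_foldl vals []
  simpa using this

-- first-match lookup in an assoc list with nodup keys returns the entry's own value
theorem pv_find?_of_nodup {ν : Type} (l : List (String × ν)) (e : String × ν)
    (hmem : e ∈ l) (hnd : (l.map Prod.fst).Nodup) :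
    l.find? (fun p => p.1 == e.1) = some e := by
  induction l with
  | nil => cases hmem
  | cons h t ih =>
      rcases List.mem_cons.mp hmem with rfl | hmt
      · simp [List.find?]
      · have hne : h.1 ≠ e.1 := by
          intro heq
          have : e.1 ∈ t.map Prod.fst := List.mem_map_of_mem hmt
          rw [← heq] at this
          exact (List.nodup_cons.mp (by simpa using hnd)).1 this
        have : (h.1 == e.1) = false := by simpa using hne
        simp only [List.find?, this]
        exact ih hmt (by simpa using (List.nodup_cons.mp (by simpa using hnd)).2)

-- the outer fold of fresh-key inserts just appends, entry by entry
theorem pv_outer_fold (F : (String × List (Int × String)) → List (Int × String)) :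
    ∀ (sched acc : List (String × List (Int × String))),
    (∀ e ∈ sched, e.1 ∉ acc.map Prod.fst) → (sched.map Prod.fst).Nodup →
    (sched.foldl (fun (nd : PySem.Dict String (List (Int × String))) entry =>
        nd.insert entry.1 (F entry)) ⟨acc⟩).items
    = acc ++ sched.map (fun e => (e.1, F e)) := by
  intro sched
  induction sched with
  | nil => intro acc _ _; simp
  | cons e t ih =>
      intro acc hdisj hnd
      simp only [List.foldl_cons]
      have hc : (⟨acc⟩ : PySem.Dict String (List (Int × String))).contains e.1 = false := by
        simp only [PySem.Dict.contains]
        rw [List.any_eq_false]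
        intro p hp heq
        exact hdisj e (List.mem_cons_self ..) (eq_of_beq heq ▸ List.mem_map_of_mem hp)
      have hins : PySem.Dict.insert (⟨acc⟩ : PySem.Dict String (List (Int × String))) e.1 (F e)
          = ⟨acc ++ [(e.1, F e)]⟩ := by simp [PySem.Dict.insert, hc]
      rw [hins, ih (acc ++ [(e.1, F e)]) ?_ (by simpa using (List.nodup_cons.mp (by simpa using hnd)).2)]
      · simp
      · intro x hx
        simp only [List.map_append, List.mem_append]
        rintro (hxa | hxe)
        · exact hdisj x (List.mem_cons_of_mem _ hx) hxa
        · have hx1 : x.1 = e.1 := by simpa using hxe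
          have : e.1 ∈ t.map Prod.fst := hx1 ▸ List.mem_map_of_mem hx
          exact (List.nodup_cons.mp (by simpa using hnd)).1 this

theorem pvInnerA_eq (vals : List String) :
    pvInnerA vals = PySem.List.enumerate (pvSieve vals) 0 := by
  have := pvInnerA_invariant vals []
  rw [pvSieve_eq_foldl_add] at this
  simpa [pvInnerA, PySem.List.enumerate] using this

-- ===== VERDICT (by name: the statement is the Claim_ definition above) =====
theorem normallize_duplicated_activity_spec : Claim_equal_normallize_duplicated_activity := by
  intro schedule _ hpre
  unfold Spec_normallize_duplicated_activity
  unfold normallize_duplicated_activity normallize_duplicated_activity_alt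
  rw [pv_outer_fold _ schedule [] (by simp) hpre]
  simp only [List.nil_append]
  apply List.map_congr_left
  intro e he
  have hget : PySem.Dict.getD (⟨schedule⟩ : PySem.Dict String (List (Int × String))) e.1 [] = e.2 := by
    simp [PySem.Dict.getD, PySem.Dict.get?, pv_find?_of_nodup schedule e he hpre]
  rw [hget, pvInnerA_eq]
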